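-- pv_equiv track=rewrite | github.com/jonlev1n/adventofcode | 2022/day17/day17.py | rock_list
-- ===== SOURCE A (Python) =====
-- def rock_list(rocks):
--     rl = []
--     r = []
--     i = 0
--     for idx, line in enumerate(rocks):
--         if line == "":
--             rl.append(r)
--             r = []
--             i = 0
--         else:
--             tmp = []
--             for j, char in enumerate(line):
--                 tmp.append(char)
--             r.append(tmp)
--             i += 1
--
--         if idx == len(rocks) - 1:
--             rl.append(r)
--     return rl
-- ===== SOURCE B (Python) =====
-- def rock_list(rocks):
--     if not rocks:
--         return []
--     seps = [i for i, line in enumerate(rocks) if line == ""]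
--     bounds = [-1] + seps + [len(rocks)]
--     return [[list(rocks[k]) for k in range(lo + 1, hi)]
--             for lo, hi in zip(bounds, bounds[1:])]
-- ===== Notes on version B (the rewrite author's own statement) =====
-- stated objective: alternative
-- what changed: Replaces A's single accumulating loop (current-group variable plus a last-index flush) by an index-then-slice decomposition: one pass collects the separator indices, then each group is sliced out between consecutive boundary markers.
import Mathlib
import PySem

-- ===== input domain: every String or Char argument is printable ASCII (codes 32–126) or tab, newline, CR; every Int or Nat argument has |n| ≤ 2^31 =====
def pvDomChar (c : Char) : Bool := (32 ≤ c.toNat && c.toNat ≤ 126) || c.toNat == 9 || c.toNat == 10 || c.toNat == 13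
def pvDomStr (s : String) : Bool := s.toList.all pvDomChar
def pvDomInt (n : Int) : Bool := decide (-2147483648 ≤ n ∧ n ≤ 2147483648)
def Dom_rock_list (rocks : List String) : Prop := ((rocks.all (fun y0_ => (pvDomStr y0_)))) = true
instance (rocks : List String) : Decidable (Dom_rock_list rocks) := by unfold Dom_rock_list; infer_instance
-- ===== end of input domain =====

-- B replaces A's single accumulating loop (current group + last-index flush) by an
-- index-then-slice decomposition: collect separator indices, then slice each group out;
-- objective: alternative (same cost, different structure).

-- ===== PORT A =====
-- the Python loop over enumerate(rocks), as structural recursion carrying (idx, rl, r, i)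
def rockLoopA (n : Int) : Int → List (List (List String)) → List (List String) → Int →
    List String → List (List (List String))
  | _, rl, _, _, [] => rl
  | idx, rl, r, i, line :: rest =>
    let st :=
      if line = "" then (rl ++ [r], ([] : List (List String)), (0 : Int))
      else (rl, r ++ [line.toList.foldl (fun tmp c => tmp ++ [String.ofList [c]]) []], i + 1)
    let rl' := if idx = n - 1 then st.1 ++ [st.2.1] else st.1
    rockLoopA n (idx + 1) rl' st.2.1 st.2.2 rest

def rock_list (rocks : List String) : List (List (List String)) :=
  rockLoopA (rocks.length : Int) 0 [] [] 0 rocks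

-- ===== PORT B =====
def rock_list_alt (rocks : List String) : List (List (List String)) :=
  if rocks = [] then [] else
  let seps := (PySem.List.enumerate rocks 0).filterMap
    (fun p => if p.2 = "" then some p.1 else none)
  let bounds := [(-1 : Int)] ++ seps ++ [((rocks.length : Int))]
  (bounds.zip bounds.tail).map (fun p =>
    (PySem.List.pyRange (p.1 + 1) p.2 1).map (fun k =>
      -- rocks[k]: every generated k is in range, the "" default is never used
      ((PySem.List.pyGet? rocks k).getD "").toList.map (fun c => String.ofList [c])))

-- ===== PRECONDITION & SPEC =====
def Spec_rock_list (rocks : List String) (out : List (List (List String))) : Prop := out = rock_list_alt rocks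
instance (rocks : List String) (out : List (List (List String))) : Decidable (Spec_rock_list rocks out) := by unfold Spec_rock_list; infer_instance

-- ===== CLAIM (what is proved, stated in full; the proofs are below) =====
def Claim_equal_rock_list : Prop := ∀ (rocks : List String), Dom_rock_list rocks → Spec_rock_list rocks (rock_list rocks)

-- ===== LEMMAS AND PROOFS =====

/-- single-character strings of a line (the canonical form both ports reduce to) -/
def pvChars (s : String) : List String := s.toList.map (fun c => String.ofList [c])

/-- reference splitter: groups of `rocks` between `""` separators -/
def pvG : List String → List (List (List String))
  | [] => [[]]
  | line :: t =>
    if line = "" then [] :: pvG t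
    else
      match pvG t with
      | g :: gs => (pvChars line :: g) :: gs
      | [] => [[pvChars line]]

theorem pvG_cons (line : String) (t : List String) :
    pvG (line :: t) =
      if line = "" then [] :: pvG t
      else
        match pvG t with
        | g :: gs => (pvChars line :: g) :: gs
        | [] => [[pvChars line]] := rfl

theorem pvG_ne_nil (l : List String) : pvG l ≠ [] := by
  cases l with
  | nil => simp [pvG]
  | cons line t =>
    simp only [pvG]
    split
    · simp
    · split <;> simp

theorem pvG_cons_eq (l : List String) : (pvG l).headD [] :: (pvG l).tail = pvG l := by
  cases h : pvG l with
  | nil => exact absurd h (pvG_ne_nil l)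
  | cons g gs => simp

theorem rockLoopA_cons (n idx : Int) (rl : List (List (List String)))
    (r : List (List String)) (i : Int) (line : String) (rest : List String) :
    rockLoopA n idx rl r i (line :: rest) =
      (let st :=
        if line = "" then (rl ++ [r], ([] : List (List String)), (0 : Int))
        else (rl, r ++ [line.toList.foldl (fun tmp c => tmp ++ [String.ofList [c]]) []], i + 1)
      rockLoopA n (idx + 1) (if idx = n - 1 then st.1 ++ [st.2.1] else st.1) st.2.1 st.2.2 rest) := rfl

theorem rockLoopA_cons_sep (n idx : Int) (rl : List (List (List String)))
    (r : List (List String)) (i : Int) (line : String) (rest : List String)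
    (h : line = "") :
    rockLoopA n idx rl r i (line :: rest) =
      rockLoopA n (idx + 1) (if idx = n - 1 then rl ++ [r] ++ [[]] else rl ++ [r]) [] 0 rest := by
  rw [rockLoopA_cons]; simp [h]

theorem rockLoopA_cons_line (n idx : Int) (rl : List (List (List String)))
    (r : List (List String)) (i : Int) (line : String) (rest : List String)
    (h : ¬ line = "") :
    rockLoopA n idx rl r i (line :: rest) =
      rockLoopA n (idx + 1)
        (if idx = n - 1 then rl ++ [r ++ [line.toList.foldl (fun tmp c => tmp ++ [String.ofList [c]]) []]] else rl)
        (r ++ [line.toList.foldl (fun tmp c => tmp ++ [String.ofList [c]]) []]) (i + 1) rest := by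
  rw [rockLoopA_cons]; simp [h]

theorem rockLoopA_nil (n idx : Int) (rl : List (List (List String)))
    (r : List (List String)) (i : Int) : rockLoopA n idx rl r i [] = rl := rfl

theorem pvFlatten_singleton {α β : Type} (f : α → β) (l : List α) :
    (l.map (fun x => [f x])).flatten = l.map f := by
  induction l with
  | nil => rfl
  | cons x t ih => simp [ih]

/-- A's loop appends the pending groups after `rl`. -/
theorem rockLoopA_eq (n : Int) : ∀ (l : List String) (idx : Int)
    (rl : List (List (List String))) (r : List (List String)) (i : Int),
    l ≠ [] → idx + l.length = n →
    rockLoopA n idx rl r i l = rl ++ (r ++ (pvG l).headD []) :: (pvG l).tail := by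
  intro l
  induction l with
  | nil => intro _ _ _ _ h _; exact absurd rfl h
  | cons line rest ih =>
    intro idx rl r i _ hidx
    cases rest with
    | nil =>
      have hlast : idx = n - 1 := by simp at hidx; omega
      by_cases hl : line = ""
      · rw [rockLoopA_cons_sep n idx rl r i line [] hl, if_pos hlast, rockLoopA_nil, hl]
        simp [pvG]
      · rw [rockLoopA_cons_line n idx rl r i line [] hl, if_pos hlast, rockLoopA_nil,
          pvG_cons, if_neg hl]
        simp [pvG, pvFlatten_singleton, pvChars]
    | cons y ys =>
      have hnl : idx ≠ n - 1 := by simp at hidx; omega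
      by_cases hl : line = ""
      · rw [rockLoopA_cons_sep n idx rl r i line (y :: ys) hl, if_neg hnl]
        rw [ih (idx + 1) (rl ++ [r]) [] 0 (by simp) (by simp at hidx ⊢; omega)]
        rw [hl, show pvG ("" :: y :: ys) = [] :: pvG (y :: ys) from by rw [pvG_cons]; simp]
        have := pvG_cons_eq (y :: ys)
        simp only [List.headD] at this ⊢
        simp [this]
      · rw [rockLoopA_cons_line n idx rl r i line (y :: ys) hl, if_neg hnl]
        rw [ih (idx + 1) rl
          (r ++ [line.toList.foldl (fun tmp c => tmp ++ [String.ofList [c]]) []]) (i + 1)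
          (by simp) (by simp at hidx ⊢; omega)]
        cases hg : pvG (y :: ys) with
        | nil => exact absurd hg (pvG_ne_nil _)
        | cons g gs =>
          rw [pvG_cons, if_neg hl, hg]
          simp [pvFlatten_singleton, pvChars]

/-- B's separator indices, starting at offset `s`. -/
def pvSeps (s : Int) (l : List String) : List Int :=
  (PySem.List.enumerate l s).filterMap (fun p => if p.2 = "" then some p.1 else none)

theorem pvSeps_nil (s : Int) : pvSeps s [] = [] := by simp [pvSeps, PySem.List.enumerate_nil]

theorem pvSeps_cons (s : Int) (line : String) (t : List String) :
    pvSeps s (line :: t) =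
      (if line = "" then [s] else []) ++ pvSeps (s + 1) t := by
  by_cases h : line = "" <;>
    simp [pvSeps, PySem.List.enumerate_cons, h]

theorem pvSeps_cons_sep (s : Int) (line : String) (t : List String) (h : line = "") :
    pvSeps s (line :: t) = s :: pvSeps (s + 1) t := by
  rw [pvSeps_cons, if_pos h]; simp

theorem pvSeps_cons_line (s : Int) (line : String) (t : List String) (h : ¬ line = "") :
    pvSeps s (line :: t) = pvSeps (s + 1) t := by
  rw [pvSeps_cons, if_neg h]; simp

theorem pvSeps_lb (s x : Int) (l : List String) (hx : x ∈ pvSeps s l) : s ≤ x := by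
  induction l generalizing s with
  | nil => simp [pvSeps_nil] at hx
  | cons line t ih =>
    rw [pvSeps_cons] at hx
    rcases List.mem_append.1 hx with h | h
    · split at h <;> simp at h; omega
    · have := ih (s + 1) h; omega

/-- B's group for the pair of bounds `(lo, hi)`. -/
def pvGroup (rocks : List String) (lo hi : Int) : List (List String) :=
  (PySem.List.pyRange (lo + 1) hi 1).map (fun k =>
    ((PySem.List.pyGet? rocks k).getD "").toList.map (fun c => String.ofList [c]))

/-- the zip-map over B's bound list equals the reference splitter on the suffix -/
theorem pvBuild_eq (rocks : List String) : ∀ (t : List String) (off : Nat),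
    rocks.drop off = t → off + t.length = rocks.length →
    ((((off : Int) - 1) :: (pvSeps off t ++ [(rocks.length : Int)])).zip
      (pvSeps off t ++ [(rocks.length : Int)])).map
      (fun p => pvGroup rocks p.1 p.2) = pvG t := by
  intro t
  induction t with
  | nil =>
    intro off _ hlen
    simp only [List.length_nil, Nat.add_zero] at hlen
    simp only [pvSeps_nil, List.nil_append, List.zip_cons_cons, List.zip_nil_right,
      List.map_cons, List.map_nil, pvG, pvGroup]
    rw [show ((off : Int) - 1 + 1) = (off : Int) from by omega,
      show ((rocks.length : Int)) = (off : Int) from by omega,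
      PySem.List.pyRange_one_eq_nil (le_refl ((off : Int)))]
    simp
  | cons line rest ih =>
    intro off hdrop hlen
    have hofflt : off < rocks.length := by simp at hlen; omega
    have hget : rocks[off]? = some line := by
      have h0 : (List.drop off rocks)[0]? = rocks[off + 0]? := List.getElem?_drop
      rw [hdrop] at h0
      simpa using h0.symm
    have hdrop' : rocks.drop (off + 1) = rest := by
      have := congrArg List.tail hdrop
      simpa [List.tail_drop] using this
    have hlen' : (off + 1) + rest.length = rocks.length := by simp at hlen ⊢; omega
    have hIH := ih (off + 1) hdrop' hlen'
    push_cast at hIH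
    rw [show ((off : Int) + 1 - 1) = (off : Int) by omega] at hIH
    by_cases hl : line = ""
    · rw [pvSeps_cons_sep (off : Int) line rest hl]
      simp only [List.cons_append, List.zip_cons_cons, List.map_cons]
      have h1 : pvGroup rocks ((off : Int) - 1) (off : Int) = [] := by
        simp only [pvGroup]
        rw [show ((off : Int) - 1 + 1) = (off : Int) by omega,
          PySem.List.pyRange_one_eq_nil (le_refl ((off : Int)))]
        simp
      rw [h1, hIH, hl, pvG_cons, if_pos rfl]
    · rw [pvSeps_cons_line (off : Int) line rest hl]
      -- the tail bound list is nonempty: destruct it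
      obtain ⟨h, L', hL⟩ := List.exists_cons_of_ne_nil
        (l := pvSeps ((off : Int) + 1) rest ++ [(rocks.length : Int)]) (by simp)
      have hoffh : (off : Int) < h := by
        have hh : h ∈ pvSeps ((off : Int) + 1) rest ++ [(rocks.length : Int)] := by
          rw [hL]; exact List.mem_cons_self
        rcases List.mem_append.1 hh with hm | hm
        · have := pvSeps_lb _ _ _ hm; omega
        · simp at hm; omega
      rw [hL] at hIH ⊢
      simp only [List.zip_cons_cons, List.map_cons] at hIH ⊢
      -- split the first range at off + 1: rocks[off] = line joins the first group
      have hsplit : pvGroup rocks ((off : Int) - 1) h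
          = pvChars line :: pvGroup rocks (off : Int) h := by
        simp only [pvGroup]
        rw [show ((off : Int) - 1 + 1) = (off : Int) by omega,
          PySem.List.pyRange_one_cons hoffh]
        simp [pvChars, PySem.List.pyGet?_natCast, hget]
      rw [hsplit, pvG_cons, if_neg hl]
      cases hg : pvG rest with
      | nil => exact absurd hg (pvG_ne_nil _)
      | cons g gs =>
        rw [hg] at hIH
        simp only [List.cons.injEq] at hIH
        rw [hIH.1, hIH.2]

theorem rock_list_eq_pvG (rocks : List String) (h : rocks ≠ []) :
    rock_list rocks = pvG rocks := by
  unfold rock_list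
  rw [rockLoopA_eq (rocks.length : Int) rocks 0 [] [] 0 h (by simp)]
  simp only [List.nil_append]
  exact pvG_cons_eq rocks

theorem rock_list_alt_eq_pvG (rocks : List String) (h : rocks ≠ []) :
    rock_list_alt rocks = pvG rocks := by
  unfold rock_list_alt
  rw [if_neg h]
  have hb := pvBuild_eq rocks rocks 0 (by simp) (by simp)
  simp only [Nat.cast_zero] at hb
  rw [← hb]
  simp [pvSeps, pvGroup]

-- ===== VERDICT (by name: the statement is the Claim_ definition above) =====
theorem rock_list_spec : Claim_equal_rock_list := by
  intro rocks _
  unfold Spec_rock_list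
  by_cases h : rocks = []
  · subst h; rfl
  · rw [rock_list_eq_pvG rocks h, rock_list_alt_eq_pvG rocks h]
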